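-- pv_equiv track=rewrite | github.com/loucaspapalazarou/ttds-jobs-monorepo | services/backend/src/carlos_main.py | perform_proximity_search
-- ===== SOURCE A (Python) =====
-- import itertools
--
-- def perform_proximity_search(tokens, PROX, positional_index):
--     #tokens=pre_process(tokens)
--     postings = [positional_index.get(token, {"posting_list":{}})['posting_list'] for token in tokens]#get postings for tokens
--     # Display Result
--     common_doc_ids = set.intersection(*(set(posting.keys()) for posting in postings)) #perform intersection to get common docs
--
--     final_doc_ids = set()
--     for doc_id in common_doc_ids:
--         positions = [posting[doc_id] for posting in postings]
--         combinations=list(itertools.product(*positions))#calculate all combinations of positions of different tokens in a doc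
--         for combination in combinations:
--             valid=all([abs(combination[i]-combination[i+1])<=PROX for i in range(len(combination)-1)])#checking if the distance is lower than the max distance
--             if(valid):
--                 final_doc_ids.add(doc_id)
--                 break
--     return final_doc_ids
-- ===== SOURCE B (Python) =====
-- def perform_proximity_search(tokens, PROX, positional_index):
--     postings = [positional_index.get(token, {"posting_list": {}})['posting_list'] for token in tokens]
--     first, rest = postings[0], postings[1:]
--     final_doc_ids = set()
--     for doc_id in first:
--         if any(doc_id not in posting for posting in rest):
--             continue
--         # DP reachability along the token chain: keep only positions reachable
--         # within PROX from some reachable position of the previous token.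
--         reachable = first[doc_id]
--         for posting in rest:
--             reachable = [x for x in posting[doc_id]
--                          if any(abs(x - q) <= PROX for q in reachable)]
--             if not reachable:
--                 break
--         if reachable:
--             final_doc_ids.add(doc_id)
--     return final_doc_ids
-- ===== Notes on version B (the rewrite author's own statement) =====
-- stated objective: faster
-- what changed: A enumerates the full cartesian product of the tokens' position lists per document and tests every tuple; B runs a reachability DP along the token chain, keeping per token only the positions within PROX of a reachable position of the previous token, and also replaces the global set intersection by filtering the first token's documents.
import Mathlib
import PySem

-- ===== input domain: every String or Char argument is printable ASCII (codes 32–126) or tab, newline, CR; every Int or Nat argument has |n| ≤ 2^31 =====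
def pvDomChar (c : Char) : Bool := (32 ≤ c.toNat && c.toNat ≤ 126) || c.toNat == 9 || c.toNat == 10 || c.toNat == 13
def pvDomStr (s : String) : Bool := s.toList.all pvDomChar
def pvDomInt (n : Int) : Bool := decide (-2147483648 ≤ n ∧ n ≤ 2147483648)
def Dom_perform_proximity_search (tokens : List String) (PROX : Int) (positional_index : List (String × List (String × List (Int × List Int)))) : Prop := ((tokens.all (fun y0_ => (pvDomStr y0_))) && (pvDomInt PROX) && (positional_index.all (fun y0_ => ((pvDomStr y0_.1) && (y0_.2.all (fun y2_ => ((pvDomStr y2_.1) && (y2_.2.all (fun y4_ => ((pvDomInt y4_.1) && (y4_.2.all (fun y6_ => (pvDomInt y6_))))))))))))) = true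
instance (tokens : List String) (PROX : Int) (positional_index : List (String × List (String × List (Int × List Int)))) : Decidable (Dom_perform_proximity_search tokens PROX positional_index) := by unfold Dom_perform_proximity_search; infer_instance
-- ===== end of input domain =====

-- B replaces A's enumeration of the full cartesian product of position lists by a
-- per-document reachability DP along the token chain (avoids enumerating all position tuples).
-- Both Pythons return a set; the ports list its elements in the order both loops insert them.

-- ===== PORT A =====
-- 'postings = [positional_index.get(token, {"posting_list":{}})["posting_list"] for token in tokens]'
-- (this line is identical in A and in B, so both ports share it)
def pvPostings (tokens : List String) (positional_index : List (String × List (String × List (Int × List Int)))) : List (PySem.Dict Int (List Int)) :=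
  tokens.map (fun t =>
    match (PySem.Dict.ofList positional_index).get? t with
    | none => PySem.Dict.empty
    | some d => PySem.Dict.ofList (((PySem.Dict.ofList d).get? "posting_list").getD []))

-- itertools.product(*positions)
def pyProduct : List (List Int) → List (List Int)
  | [] => [[]]
  | xs :: rest => xs.flatMap (fun x => (pyProduct rest).map (fun c => x :: c))

-- 'all([abs(combination[i]-combination[i+1])<=PROX for i in range(len(combination)-1)])'
def pvValid (PROX : Int) (c : List Int) : Bool :=
  (PySem.List.pyRange 0 (PySem.List.len c - 1) 1).all
    (fun i => decide (|PySem.List.pyGetD c i 0 - PySem.List.pyGetD c (i + 1) 0| ≤ PROX))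

def perform_proximity_search (tokens : List String) (PROX : Int) (positional_index : List (String × List (String × List (Int × List Int)))) : List Int :=
  let postings := pvPostings tokens positional_index
  let common : PySem.Set Int :=
    match postings.map (fun p => PySem.Set.ofList p.keys) with
    | [] => []  -- tokens = []: the Python raises TypeError; excluded by Pre_
    | s :: rest => rest.foldl PySem.Set.inter s
  common.foldl (fun acc doc_id =>
      let positions := postings.map (fun p => (p.get? doc_id).getD [])
      -- 'for combination in combinations: if valid: add; break' = add iff some combination is valid
      if (pyProduct positions).any (pvValid PROX) then PySem.Set.add acc doc_id else acc)
    PySem.Set.empty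

-- ===== PORT B =====
-- 'for posting in rest: reachable = [x ... ]; if not reachable: break'
def pvReachLoop (PROX : Int) (doc : Int) : List Int → List (PySem.Dict Int (List Int)) → List Int
  | reach, [] => reach
  | reach, p :: ps =>
    let r := ((p.get? doc).getD []).filter (fun x => reach.any (fun q => decide (|x - q| ≤ PROX)))
    if r.isEmpty then r else pvReachLoop PROX doc r ps

def perform_proximity_search_alt (tokens : List String) (PROX : Int) (positional_index : List (String × List (String × List (Int × List Int)))) : List Int :=
  match pvPostings tokens positional_index with
  | [] => []  -- tokens = []: the Python raises IndexError; excluded by Pre_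
  | first :: rest =>
    first.keys.foldl (fun acc doc_id =>
        if rest.all (fun p => p.contains doc_id) then
          if (pvReachLoop PROX doc_id ((first.get? doc_id).getD []) rest).isEmpty then acc
          else PySem.Set.add acc doc_id
        else acc)
      PySem.Set.empty

-- ===== PRECONDITION & SPEC =====
-- Pre_ excludes exactly the inputs where the Python A raises: empty 'tokens' (TypeError in
-- set.intersection with no arguments) and a token whose index entry lacks the "posting_list" key (KeyError).
def Pre_perform_proximity_search (tokens : List String) (PROX : Int) (positional_index : List (String × List (String × List (Int × List Int)))) : Prop :=
  tokens ≠ [] ∧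
  tokens.all (fun t =>
    ((PySem.Dict.ofList positional_index).get? t).all
      (fun d => (PySem.Dict.ofList d).contains "posting_list")) = true
instance (tokens : List String) (PROX : Int) (positional_index : List (String × List (String × List (Int × List Int)))) : Decidable (Pre_perform_proximity_search tokens PROX positional_index) := by unfold Pre_perform_proximity_search; infer_instance

def pvWitness_perform_proximity_search : List String × Int × (List (String × List (String × List (Int × List Int)))) :=
  (["a", "b"], 2, [("a", [("posting_list", [(0, [1, 5]), (1, [3])])]), ("b", [("posting_list", [(0, [2]), (2, [7])])])])

def Spec_perform_proximity_search (tokens : List String) (PROX : Int) (positional_index : List (String × List (String × List (Int × List Int)))) (out : List Int) : Prop := out = perform_proximity_search_alt tokens PROX positional_index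
instance (tokens : List String) (PROX : Int) (positional_index : List (String × List (String × List (Int × List Int)))) (out : List Int) : Decidable (Spec_perform_proximity_search tokens PROX positional_index out) := by unfold Spec_perform_proximity_search; infer_instance

-- ===== CLAIM (what is proved, stated in full; the proofs are below) =====
def Claim_equal_perform_proximity_search : Prop := ∀ (tokens : List String) (PROX : Int) (positional_index : List (String × List (String × List (Int × List Int)))), Dom_perform_proximity_search tokens PROX positional_index → Pre_perform_proximity_search tokens PROX positional_index → Spec_perform_proximity_search tokens PROX positional_index (perform_proximity_search tokens PROX positional_index)

-- ===== LEMMAS AND PROOFS =====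

-- 'x reaches the end of the chain of position lists within PROX at every step'
def pvReaches (PROX : Int) : Int → List (List Int) → Prop
  | _, [] => True
  | x, ys :: rest => ∃ y ∈ ys, |x - y| ≤ PROX ∧ pvReaches PROX y rest

-- A's index-based validity test is adjacency along the tuple
lemma pvValid_iff_chain (PROX : Int) (c : List Int) :
    pvValid PROX c = true ↔ c.IsChain (fun a b => |a - b| ≤ PROX) := by
  rw [List.isChain_iff_getElem, pvValid, List.all_eq_true]
  constructor
  · intro h i hi
    have h2 := h (i : Int) (by
      rw [PySem.List.mem_pyRange_one, PySem.List.len_eq]; omega)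
    rw [PySem.List.pyGetD_eq_getElem c 0 (by omega) (by omega),
        PySem.List.pyGetD_eq_getElem c 0 (by omega) (by omega),
        decide_eq_true_eq] at h2
    have e1 : ((i : Int)).toNat = i := by omega
    have e2 : ((i : Int) + 1).toNat = i + 1 := by omega
    simp_rw [e1, e2] at h2
    exact h2
  · intro h i hi
    rw [PySem.List.mem_pyRange_one, PySem.List.len_eq] at hi
    rw [PySem.List.pyGetD_eq_getElem c 0 (by omega) (by omega),
        PySem.List.pyGetD_eq_getElem c 0 (by omega) (by omega), decide_eq_true_eq]
    have e2 : (i + 1).toNat = i.toNat + 1 := by omega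
    simp_rw [e2]
    exact h i.toNat (by omega)

lemma mem_pyProduct_cons (xs : List Int) (rest : List (List Int)) (c : List Int) :
    c ∈ pyProduct (xs :: rest) ↔ ∃ x ∈ xs, ∃ t ∈ pyProduct rest, c = x :: t := by
  simp [pyProduct, List.mem_flatMap, List.mem_map, eq_comm]

lemma chain_product (PROX : Int) (x : Int) (rest : List (List Int)) :
    (∃ t ∈ pyProduct rest, (x :: t).IsChain (fun a b => |a - b| ≤ PROX)) ↔ pvReaches PROX x rest := by
  induction rest generalizing x with
  | nil => simp [pyProduct, pvReaches]
  | cons ys rest ih =>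
    simp only [mem_pyProduct_cons, pvReaches]
    constructor
    · rintro ⟨t, ⟨y, hy, t', ht', rfl⟩, hch⟩
      rw [List.isChain_cons_cons] at hch
      exact ⟨y, hy, hch.1, (ih y).mp ⟨t', ht', hch.2⟩⟩
    · rintro ⟨y, hy, hxy, hr⟩
      obtain ⟨t', ht', hch⟩ := (ih y).mpr hr
      exact ⟨y :: t', ⟨y, hy, t', ht', rfl⟩, List.isChain_cons_cons.mpr ⟨hxy, hch⟩⟩

lemma any_product (PROX : Int) (xs : List Int) (rest : List (List Int)) :
    (pyProduct (xs :: rest)).any (pvValid PROX) = true ↔ ∃ x ∈ xs, pvReaches PROX x rest := by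
  rw [List.any_eq_true]
  constructor
  · rintro ⟨c, hc, hv⟩
    obtain ⟨x, hx, t, ht, rfl⟩ := (mem_pyProduct_cons xs rest c).mp hc
    exact ⟨x, hx, (chain_product PROX x rest).mp ⟨t, ht, (pvValid_iff_chain PROX _).mp hv⟩⟩
  · rintro ⟨x, hx, hr⟩
    obtain ⟨t, ht, hch⟩ := (chain_product PROX x rest).mpr hr
    exact ⟨x :: t, (mem_pyProduct_cons xs rest _).mpr ⟨x, hx, t, ht, rfl⟩,
      (pvValid_iff_chain PROX _).mpr hch⟩

lemma reachLoop_isEmpty (PROX doc : Int) (reach : List Int) (ps : List (PySem.Dict Int (List Int))) :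
    (pvReachLoop PROX doc reach ps).isEmpty = false ↔
      ∃ x ∈ reach, pvReaches PROX x (ps.map (fun p => (p.get? doc).getD [])) := by
  induction ps generalizing reach with
  | nil =>
    simp [pvReachLoop, pvReaches, List.eq_nil_iff_forall_not_mem]
  | cons p ps ih =>
    simp only [pvReachLoop, List.map_cons, pvReaches]
    by_cases hr : (((p.get? doc).getD []).filter (fun x => reach.any (fun q => decide (|x - q| ≤ PROX)))).isEmpty = true
    · rw [if_pos hr]
      rw [List.isEmpty_iff] at hr
      simp only [hr, List.isEmpty_nil, Bool.true_eq_false, false_iff]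
      rintro ⟨x, hx, y, hy, hxy, -⟩
      have : y ∈ (((p.get? doc).getD []).filter (fun x => reach.any (fun q => decide (|x - q| ≤ PROX)))) := by
        rw [List.mem_filter, List.any_eq_true]
        exact ⟨hy, x, hx, by rw [decide_eq_true_eq, abs_sub_comm]; exact hxy⟩
      simp [hr] at this
    · rw [if_neg hr, ih]
      constructor
      · rintro ⟨y, hy, hre⟩
        rw [List.mem_filter, List.any_eq_true] at hy
        obtain ⟨hy, x, hx, hxy⟩ := hy
        rw [decide_eq_true_eq, abs_sub_comm] at hxy
        exact ⟨x, hx, y, hy, hxy, hre⟩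
      · rintro ⟨x, hx, y, hy, hxy, hre⟩
        refine ⟨y, ?_, hre⟩
        rw [List.mem_filter, List.any_eq_true]
        exact ⟨hy, x, hx, by rw [decide_eq_true_eq, abs_sub_comm]; exact hxy⟩

lemma foldl_inter_eq_filter (sets : List (List Int)) (s : List Int) :
    sets.foldl PySem.Set.inter s = s.filter (fun d => sets.all (fun t => t.contains d)) := by
  induction sets generalizing s with
  | nil => simp
  | cons t sets ih =>
    rw [List.foldl_cons, ih, PySem.Set.inter, List.filter_filter]
    simp [Bool.and_comm]

lemma foldl_filter_if (l : List Int) (q : Int → Bool) (f : PySem.Set Int → Int → PySem.Set Int) (acc : PySem.Set Int) :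
    (l.filter q).foldl f acc = l.foldl (fun a x => if q x then f a x else a) acc := by
  induction l generalizing acc with
  | nil => rfl
  | cons x l ih =>
    by_cases hx : q x = true <;> simp [hx, ih]

lemma postings_keys_nodup (tokens : List String) (pi : List (String × List (String × List (Int × List Int))))
    (p : PySem.Dict Int (List Int)) (hp : p ∈ pvPostings tokens pi) : p.keys.Nodup := by
  rw [pvPostings, List.mem_map] at hp
  obtain ⟨t, -, rfl⟩ := hp
  cases (PySem.Dict.ofList pi).get? t with
  | none => simp [PySem.Dict.keys, PySem.Dict.empty]
  | some d => exact PySem.Dict.nodup_keys_ofList _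

-- ===== VERDICT (by name: the statement is the Claim_ definition above) =====
theorem perform_proximity_search_spec : Claim_equal_perform_proximity_search := by
  intro tokens PROX positional_index _hDom hPre
  unfold Spec_perform_proximity_search perform_proximity_search perform_proximity_search_alt
  obtain ⟨hne, -⟩ := hPre
  cases hps : pvPostings tokens positional_index with
  | nil =>
    rw [pvPostings, List.map_eq_nil_iff] at hps
    exact absurd hps hne
  | cons first rest =>
  simp only [List.map_cons]
  -- the intersection is the first dict's keys filtered by membership in the rest
  have hnd : first.keys.Nodup := postings_keys_nodup tokens positional_index first (by rw [hps]; exact List.mem_cons_self)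
  rw [foldl_inter_eq_filter, PySem.Set.ofList_eq_self_of_nodup _ hnd]
  have hq : ∀ (p : PySem.Dict Int (List Int)) (d : Int),
      List.contains (PySem.Set.ofList p.keys) d = p.contains d := by
    intro p d
    rw [Bool.eq_iff_iff]
    simp [PySem.Set.mem_ofList, PySem.Dict.contains_iff_mem_keys]
  rw [List.filter_congr (fun d _ => by
    rw [List.all_map]; exact List.all_congr rfl (fun p => hq p d) :
    ∀ d ∈ first.keys, ((rest.map (fun p => PySem.Set.ofList p.keys)).all (fun t => List.contains t d)) = rest.all (fun p => p.contains d))]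
  rw [foldl_filter_if]
  apply PySem.List.foldl_congr_mem
  intro a d _
  by_cases hm : rest.all (fun p => p.contains d) = true
  · rw [if_pos hm, if_pos hm]
    -- per-document: some product tuple is valid ⟺ the reachability DP ends nonempty
    have key : ((pyProduct ((first.get? d).getD [] :: rest.map (fun p => (p.get? d).getD []))).any (pvValid PROX) = true)
        ↔ ((pvReachLoop PROX d ((first.get? d).getD []) rest).isEmpty = false) :=
      (any_product PROX _ _).trans (reachLoop_isEmpty PROX d _ rest).symm
    by_cases hE : (pvReachLoop PROX d ((first.get? d).getD []) rest).isEmpty = true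
    · rw [if_pos hE, if_neg (by rw [key]; simp [hE])]
    · rw [if_neg hE, if_pos (key.mpr (by simpa using hE))]
  · rw [if_neg hm, if_neg hm]
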